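-- pv_equiv track=rewrite | github.com/yiyabo/GAgent | tool_box/tools_impl/code_executor.py | _sanitize_task_dir_component
-- ===== SOURCE A (Python) =====
-- from typing import Any, AsyncIterator, Dict, List, Optional, Callable, Awaitable, Sequence
--
-- def _sanitize_task_dir_component(value: str) -> str:
--     token = str(value or "").strip().lower()
--     if not token:
--         return "llm_task"
--
--     normalized_chars: List[str] = []
--     prev_is_sep = False
--     for ch in token:
--         if ("a" <= ch <= "z") or ("0" <= ch <= "9"):
--             normalized_chars.append(ch)
--             prev_is_sep = False
--             continue
--         if ch in {"_", "-", " ", "/", "\\", ".", ":"}: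
--             if not prev_is_sep:
--                 normalized_chars.append("_")
--                 prev_is_sep = True
--             continue
--         # Drop other punctuation and unicode symbols.
--         if not prev_is_sep:
--             normalized_chars.append("_")
--             prev_is_sep = True
--
--     sanitized = "".join(normalized_chars).strip("_")
--     if not sanitized:
--         return "llm_task"
--     if len(sanitized) > 80:
--         sanitized = sanitized[:80].rstrip("_")
--     return sanitized or "llm_task"
-- ===== SOURCE B (Python) =====
-- def _sanitize_task_dir_component(value: str) -> str:
--     token = str(value or "").strip().lower()
--     if not token:
--         return "llm_task"
--     # map every char outside [a-z0-9] to '_', then drop a '_' whose predecessor is '_'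
--     mapped = [c if ("a" <= c <= "z" or "0" <= c <= "9") else "_" for c in token]
--     collapsed = [c for c, prev in zip(mapped, ["\x00"] + mapped[:-1]) if c != "_" or prev != "_"]
--     sanitized = "".join(collapsed).strip("_")
--     if not sanitized:
--         return "llm_task"
--     if len(sanitized) > 80:
--         sanitized = sanitized[:80].rstrip("_")
--     return sanitized or "llm_task"
-- ===== Notes on version B (the rewrite author's own statement) =====
-- stated objective: simpler
-- what changed: A's single stateful loop carrying a prev_is_sep flag (with two redundant non-alphanumeric branches) is replaced by a stateless map of every character outside lowercase-alphanumeric to an underscore, followed by a neighbour-comparison collapse of repeated underscores via zip with the shifted list.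
import Mathlib
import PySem

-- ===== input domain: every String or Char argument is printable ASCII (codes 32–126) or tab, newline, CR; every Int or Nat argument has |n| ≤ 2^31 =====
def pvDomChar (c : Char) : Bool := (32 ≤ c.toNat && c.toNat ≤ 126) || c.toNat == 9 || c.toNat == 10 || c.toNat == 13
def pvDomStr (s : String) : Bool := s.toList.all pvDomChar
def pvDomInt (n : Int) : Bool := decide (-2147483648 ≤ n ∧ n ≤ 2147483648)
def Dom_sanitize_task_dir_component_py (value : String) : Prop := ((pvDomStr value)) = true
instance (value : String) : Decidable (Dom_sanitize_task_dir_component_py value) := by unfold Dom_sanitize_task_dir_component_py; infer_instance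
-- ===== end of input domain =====

-- B replaces A's stateful prev_is_sep character loop by a stateless map-to-underscore pass plus a
-- neighbour-comparison collapse (zip with the shifted list); objective: simpler. Return values proved equal.

-- shared low-level helper: exact port of Python's s.rstrip("_")
def pvRstripUnderscore (cs : List Char) : List Char :=
  (cs.reverse.dropWhile (· == '_')).reverse

-- ===== PORT A =====
-- loop body of A's for-loop (state: normalized_chars, prev_is_sep)
def pvStepA (s : List Char × Bool) (ch : Char) : List Char × Bool :=
  if ('a' ≤ ch ∧ ch ≤ 'z') ∨ ('0' ≤ ch ∧ ch ≤ '9') then (s.1 ++ [ch], false)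
  else if ch ∈ ['_', '-', ' ', '/', '\\', '.', ':'] then
    (if s.2 then s else (s.1 ++ ['_'], true))
  else
    (if s.2 then s else (s.1 ++ ['_'], true))

def sanitize_task_dir_component_py (value : String) : String :=
  -- token = str(value or "").strip().lower()  ("" or value is value for strings)
  let token := PySem.Chars.lower (PySem.Chars.strip value.toList)
  if token = [] then "llm_task"
  else
    let st := token.foldl pvStepA ([], false)
    let sanitized := PySem.Chars.stripChars st.1 ['_']
    if sanitized = [] then "llm_task"
    else
      let sanitized := if sanitized.length > 80
        then pvRstripUnderscore (PySem.List.slice sanitized none (some 80)) else sanitized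
      if sanitized = [] then "llm_task" else String.ofList sanitized

-- ===== PORT B =====
-- mapped = [c if c alnum else '_' for c in token]
def pvMapC (c : Char) : Char :=
  if ('a' ≤ c ∧ c ≤ 'z') ∨ ('0' ≤ c ∧ c ≤ '9') then c else '_'

def sanitize_task_dir_component_py_alt (value : String) : String :=
  let token := PySem.Chars.lower (PySem.Chars.strip value.toList)
  if token = [] then "llm_task"
  else
    let mapped := token.map pvMapC
    -- [c for c, prev in zip(mapped, ["\x00"] + mapped[:-1]) if c != "_" or prev != "_"]
    let collapsed := ((mapped.zip ('\x00' :: PySem.List.slice mapped none (some (-1)))).filter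
        (fun cp => cp.1 != '_' || cp.2 != '_')).map Prod.fst
    let sanitized := PySem.Chars.stripChars collapsed ['_']
    if sanitized = [] then "llm_task"
    else
      let sanitized := if sanitized.length > 80
        then pvRstripUnderscore (PySem.List.slice sanitized none (some 80)) else sanitized
      if sanitized = [] then "llm_task" else String.ofList sanitized

-- ===== PRECONDITION & SPEC =====
def Spec_sanitize_task_dir_component_py (value : String) (out : String) : Prop := out = sanitize_task_dir_component_py_alt value
instance (value : String) (out : String) : Decidable (Spec_sanitize_task_dir_component_py value out) := by unfold Spec_sanitize_task_dir_component_py; infer_instance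

-- ===== CLAIM (what is proved, stated in full; the proofs are below) =====
def Claim_equal_sanitize_task_dir_component_py : Prop := ∀ (value : String), Dom_sanitize_task_dir_component_py value → Spec_sanitize_task_dir_component_py value (sanitize_task_dir_component_py value)

-- ===== LEMMAS AND PROOFS =====

-- canonical collapse: drop every '_' that follows a separator ('prev' = previous char was '_')
def pvCollapse : Bool → List Char → List Char
  | _, [] => []
  | prev, c :: cs =>
    if c = '_' then (if prev then pvCollapse true cs else '_' :: pvCollapse true cs)
    else c :: pvCollapse false cs

def pvEnd : Bool → List Char → Bool
  | prev, [] => prev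
  | _, c :: cs => pvEnd (c = '_') cs

lemma pvMapC_ne_underscore_of (c : Char)
    (h : ('a' ≤ c ∧ c ≤ 'z') ∨ ('0' ≤ c ∧ c ≤ '9')) : c ≠ '_' := by
  rintro rfl
  rcases h with ⟨h1, h2⟩ | ⟨h1, h2⟩ <;> revert h1 h2 <;> decide

lemma pvLoopA (cs : List Char) (acc : List Char) (prev : Bool) :
    cs.foldl pvStepA (acc, prev)
      = (acc ++ pvCollapse prev (cs.map pvMapC), pvEnd prev (cs.map pvMapC)) := by
  induction cs generalizing acc prev with
  | nil => simp [pvCollapse, pvEnd]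
  | cons c cs ih =>
    by_cases h : ('a' ≤ c ∧ c ≤ 'z') ∨ ('0' ≤ c ∧ c ≤ '9')
    · have hne : c ≠ '_' := pvMapC_ne_underscore_of c h
      simp [pvStepA, h, ih, pvMapC, pvCollapse, pvEnd, hne]
    · cases prev with
      | true => simp [pvStepA, h, ih, pvMapC, pvCollapse, pvEnd]
      | false => simp [pvStepA, h, ih, pvMapC, pvCollapse, pvEnd]

lemma pvZipFilter (m : List Char) (p : Char) :
    ((m.zip (p :: m.dropLast)).filter (fun cp => cp.1 != '_' || cp.2 != '_')).map Prod.fst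
      = pvCollapse (p = '_') m := by
  induction m generalizing p with
  | nil => simp [pvCollapse]
  | cons c cs ih =>
    have hzip : cs.zip ((c :: cs).dropLast) = cs.zip (c :: cs.dropLast) := by
      cases cs with
      | nil => simp
      | cons d ds => rfl
    by_cases hc : c = '_'
    · by_cases hp : p = '_'
      · subst hc; subst hp
        simp only [List.zip_cons_cons, List.filter_cons]
        simp only [hzip] at *
        simpa [pvCollapse] using ih '_'
      · subst hc
        simp only [List.zip_cons_cons, List.filter_cons]
        simp only [hzip] at *
        simp [pvCollapse, hp, ih '_']
    · simp only [List.zip_cons_cons, List.filter_cons]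
      simp only [hzip] at *
      simp [pvCollapse, hc, ih c]

lemma pv_main (value : String) :
    sanitize_task_dir_component_py value = sanitize_task_dir_component_py_alt value := by
  unfold sanitize_task_dir_component_py sanitize_task_dir_component_py_alt
  by_cases h : PySem.Chars.lower (PySem.Chars.strip value.toList) = []
  · simp [h]
  · simp only [if_neg h]
    have hA := pvLoopA (PySem.Chars.lower (PySem.Chars.strip value.toList)) [] false
    have hslice : PySem.List.slice
        ((PySem.Chars.lower (PySem.Chars.strip value.toList)).map pvMapC) none (some (-1))
        = ((PySem.Chars.lower (PySem.Chars.strip value.toList)).map pvMapC).dropLast :=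
      PySem.List.slice_to_neg_one _
    have hB : ((((PySem.Chars.lower (PySem.Chars.strip value.toList)).map pvMapC).zip
          ('\x00' :: ((PySem.Chars.lower (PySem.Chars.strip value.toList)).map pvMapC).dropLast)).filter
          (fun cp => cp.1 != '_' || cp.2 != '_')).map Prod.fst
        = pvCollapse false ((PySem.Chars.lower (PySem.Chars.strip value.toList)).map pvMapC) := by
      simpa using pvZipFilter ((PySem.Chars.lower (PySem.Chars.strip value.toList)).map pvMapC) '\x00'
    rw [hslice, hA, hB]
    simp

-- ===== VERDICT (by name: the statement is the Claim_ definition above) =====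
theorem sanitize_task_dir_component_py_spec : Claim_equal_sanitize_task_dir_component_py := by
  intro value _
  unfold Spec_sanitize_task_dir_component_py
  exact pv_main value
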